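-- pv_equiv track=rewrite | github.com/dxvxd5/aoc-2023 | aoc_2023/day3/day3.py | __find_next_number_starting_at_idx
-- ===== SOURCE A (Python) =====
-- def __find_next_number_starting_at_idx(
--     line: str, start_index=0
-- ) -> tuple[str | None, int | None]:
--     potential_number = ""
--     number_start_at: int | None = None
--
--     for idx, char in enumerate(line[start_index:]):
--         if char.isdigit():
--             if number_start_at is None:
--                 number_start_at = idx + start_index
--
--             potential_number += char
--         else:
--             if potential_number:
--                 return (potential_number, number_start_at)
--
--     return (potential_number or None, number_start_at)
-- ===== SOURCE B (Python) =====
-- def __find_next_number_starting_at_idx(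
--     line: str, start_index=0
-- ) -> tuple[str | None, int | None]:
--     s = line[start_index:]
--     n = len(s)
--     i = 0
--     while i < n and not s[i].isdigit():
--         i += 1
--     if i == n:
--         return (None, None)
--     j = i
--     while j < n and s[j].isdigit():
--         j += 1
--     return (s[i:j], i + start_index)
-- ===== Notes on version B (the rewrite author's own statement) =====
-- stated objective: alternative
-- what changed: A's single pass with a growing accumulator string, an Optional start marker and an early return is replaced by a two-phase index scan (find the first digit, then the end of the digit run) that returns a slice of the string.
import Mathlib
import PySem

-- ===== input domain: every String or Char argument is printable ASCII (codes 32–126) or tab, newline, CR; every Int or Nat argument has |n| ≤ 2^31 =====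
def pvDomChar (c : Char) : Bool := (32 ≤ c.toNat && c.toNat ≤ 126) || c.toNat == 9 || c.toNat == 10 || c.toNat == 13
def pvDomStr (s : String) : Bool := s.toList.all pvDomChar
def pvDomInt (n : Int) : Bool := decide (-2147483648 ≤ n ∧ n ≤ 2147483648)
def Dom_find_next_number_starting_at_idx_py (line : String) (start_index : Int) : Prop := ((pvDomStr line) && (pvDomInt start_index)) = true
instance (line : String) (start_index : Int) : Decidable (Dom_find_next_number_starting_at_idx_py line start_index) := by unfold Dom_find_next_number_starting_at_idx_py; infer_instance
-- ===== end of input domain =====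

-- B replaces A's accumulator-and-early-return pass by a two-phase index scan returning a slice (objective: alternative, same cost).

-- ===== PORT A =====
-- loop over enumerate(line[start_index:]) with state (potential_number, number_start_at); early return on a non-digit after digits
def pyAFindLoop (start_index : Int) : List (Int × Char) → List Char → Option Int → Option String × Option Int
  | [], acc, st => (if acc = [] then none else some (String.mk acc), st)
  | (idx, c) :: rest, acc, st =>
    if PySem.Chars.isdigit c then
      pyAFindLoop start_index rest (acc ++ [c]) (match st with | none => some (idx + start_index) | some v => some v)
    else
      if acc = [] then pyAFindLoop start_index rest acc st
      else (some (String.mk acc), st)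

def find_next_number_starting_at_idx_py (line : String) (start_index : Int) : Option String × Option Int :=
  pyAFindLoop start_index (PySem.List.enumerate (PySem.List.slice line.toList (some start_index) none) 0) [] none

-- ===== PORT B =====
-- while i < n and not s[i].isdigit(): i += 1
def bFirstDigit (s : List Char) (i : Nat) : Nat :=
  if h : i < s.length then
    if PySem.Chars.isdigit s[i] then i else bFirstDigit s (i + 1)
  else i
termination_by s.length - i

-- while j < n and s[j].isdigit(): j += 1
def bEndRun (s : List Char) (j : Nat) : Nat :=
  if h : j < s.length then
    if PySem.Chars.isdigit s[j] then bEndRun s (j + 1) else j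
  else j
termination_by s.length - j

def find_next_number_starting_at_idx_py_alt (line : String) (start_index : Int) : Option String × Option Int :=
  let s := PySem.List.slice line.toList (some start_index) none
  let i := bFirstDigit s 0
  if i = s.length then (none, none)
  else
    let j := bEndRun s i
    (some (String.mk (PySem.List.slice s (some (i : Int)) (some (j : Int)))), some ((i : Int) + start_index))

-- ===== PRECONDITION & SPEC =====
def Spec_find_next_number_starting_at_idx_py (line : String) (start_index : Int) (out : Option String × Option Int) : Prop := out = find_next_number_starting_at_idx_py_alt line start_index
instance (line : String) (start_index : Int) (out : Option String × Option Int) : Decidable (Spec_find_next_number_starting_at_idx_py line start_index out) := by unfold Spec_find_next_number_starting_at_idx_py; infer_instance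

-- ===== CLAIM (what is proved, stated in full; the proofs are below) =====
def Claim_equal_find_next_number_starting_at_idx_py : Prop := ∀ (line : String) (start_index : Int), Dom_find_next_number_starting_at_idx_py line start_index → Spec_find_next_number_starting_at_idx_py line start_index (find_next_number_starting_at_idx_py line start_index)

-- ===== LEMMAS AND PROOFS =====

theorem takeWhile_length_le {α : Type} (p : α → Bool) (l : List α) :
    (l.takeWhile p).length ≤ l.length := by
  induction l with
  | nil => simp
  | cons x xs ih =>
    simp only [List.takeWhile]
    by_cases hp : p x <;> simp [hp] <;> omega

theorem dropWhile_eq_drop {α : Type} (p : α → Bool) (l : List α) :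
    l.dropWhile p = l.drop (l.takeWhile p).length := by
  induction l with
  | nil => simp
  | cons x xs ih =>
    simp only [List.takeWhile, List.dropWhile]
    by_cases hp : p x <;> simp [hp, ih]

theorem take_length_takeWhile {α : Type} (p : α → Bool) (l : List α) :
    l.take (l.takeWhile p).length = l.takeWhile p := by
  induction l with
  | nil => simp
  | cons x xs ih =>
    simp only [List.takeWhile]
    by_cases hp : p x <;> simp [hp, ih]

-- A's loop once digits have been collected: returns acc ++ the remaining digit run, start st
theorem pyAFindLoop_digits (si : Int) (cs : List Char) (k : Int) (acc : List Char) (v : Int)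
    (hacc : acc ≠ []) :
    pyAFindLoop si (PySem.List.enumerate cs k) acc (some v) =
      (some (String.mk (acc ++ cs.takeWhile (fun c => PySem.Chars.isdigit c))), some v) := by
  induction cs generalizing k acc with
  | nil => simp [PySem.List.enumerate_nil, pyAFindLoop, hacc]
  | cons c cs ih =>
    simp only [PySem.List.enumerate_cons, pyAFindLoop, List.takeWhile]
    by_cases hd : PySem.Chars.isdigit c
    · simp only [hd, reduceIte]
      rw [ih (k + 1) (acc ++ [c]) (by simp)]
      simp
    · simp [hd, hacc]

-- A's loop in the skip phase (empty acc, no start yet), from counter k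
theorem pyAFindLoop_skip (si : Int) (cs : List Char) (k : Int) :
    pyAFindLoop si (PySem.List.enumerate cs k) [] none =
      (match cs.dropWhile (fun c => !PySem.Chars.isdigit c) with
       | [] => (none, none)
       | rest => (some (String.mk (rest.takeWhile (fun c => PySem.Chars.isdigit c))),
                  some (k + ((cs.takeWhile (fun c => !PySem.Chars.isdigit c)).length : Int) + si))) := by
  induction cs generalizing k with
  | nil => simp [PySem.List.enumerate_nil, pyAFindLoop, List.dropWhile]
  | cons c cs ih =>
    simp only [PySem.List.enumerate_cons, pyAFindLoop, List.dropWhile, List.takeWhile]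
    by_cases hd : PySem.Chars.isdigit c
    · simp only [hd, Bool.not_true, reduceIte, List.nil_append]
      rw [pyAFindLoop_digits si cs (k + 1) [c] (k + si) (by simp)]
      simp [hd]
    · simp only [hd, Bool.not_false, reduceIte, Bool.false_eq_true]
      rw [ih (k + 1)]
      rcases h : cs.dropWhile (fun c => !PySem.Chars.isdigit c) with _ | ⟨r, rs⟩
      · simp
      · refine congrArg₂ Prod.mk rfl ?_
        congr 1
        simp only [List.length_cons]
        push_cast
        ring

-- bFirstDigit counts the leading non-digits from position i
theorem bFirstDigit_eq (s : List Char) (i : Nat) (h : i ≤ s.length) :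
    bFirstDigit s i = i + ((s.drop i).takeWhile (fun c => !PySem.Chars.isdigit c)).length := by
  unfold bFirstDigit
  by_cases hi : i < s.length
  · rw [dif_pos hi]
    have hdrop : s.drop i = s[i] :: s.drop (i + 1) := List.drop_eq_getElem_cons hi
    by_cases hd : PySem.Chars.isdigit s[i]
    · rw [if_pos hd, hdrop]
      simp only [List.takeWhile, hd, Bool.not_true, Bool.false_eq_true, reduceIte,
        List.length_nil]
      omega
    · rw [if_neg hd, bFirstDigit_eq s (i + 1) (by omega), hdrop]
      have hb : (!PySem.Chars.isdigit s[i]) = true := by simp [hd]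
      simp only [List.takeWhile, hb, reduceIte, List.length_cons]
      omega
  · rw [dif_neg hi]
    rw [List.drop_eq_nil_of_le (by omega : s.length ≤ i)]
    simp
termination_by s.length - i

-- bEndRun counts the digit run from position j
theorem bEndRun_eq (s : List Char) (j : Nat) (h : j ≤ s.length) :
    bEndRun s j = j + ((s.drop j).takeWhile (fun c => PySem.Chars.isdigit c)).length := by
  unfold bEndRun
  by_cases hj : j < s.length
  · rw [dif_pos hj]
    have hdrop : s.drop j = s[j] :: s.drop (j + 1) := List.drop_eq_getElem_cons hj
    by_cases hd : PySem.Chars.isdigit s[j]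
    · rw [if_pos hd, bEndRun_eq s (j + 1) (by omega), hdrop]
      simp only [List.takeWhile, hd, reduceIte, List.length_cons]
      omega
    · rw [if_neg hd, hdrop]
      simp only [List.takeWhile, hd, Bool.false_eq_true, reduceIte, List.length_nil]
      omega
  · rw [dif_neg hj]
    rw [List.drop_eq_nil_of_le (by omega : s.length ≤ j)]
    simp
termination_by s.length - j

-- both programs on the same character list agree
theorem main_eq (s : List Char) (si : Int) :
    pyAFindLoop si (PySem.List.enumerate s 0) [] none =
      (if bFirstDigit s 0 = s.length then (none, none)
       else (some (String.mk (PySem.List.slice s (some ((bFirstDigit s 0 : Nat) : Int))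
                     (some ((bEndRun s (bFirstDigit s 0) : Nat) : Int)))),
             some (((bFirstDigit s 0 : Nat) : Int) + si))) := by
  rw [pyAFindLoop_skip si s 0]
  have hfd : bFirstDigit s 0 = (s.takeWhile (fun c => !PySem.Chars.isdigit c)).length := by
    simpa using bFirstDigit_eq s 0 (by omega)
  have hlen := takeWhile_length_le (fun c => !PySem.Chars.isdigit c) s
  have hdt := dropWhile_eq_drop (fun c => !PySem.Chars.isdigit c) s
  rcases h : s.dropWhile (fun c => !PySem.Chars.isdigit c) with _ | ⟨r, rs⟩
  · have hl : (s.takeWhile (fun c => !PySem.Chars.isdigit c)).length = s.length := by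
      have := congrArg List.length hdt
      rw [h] at this
      simp at this
      omega
    rw [if_pos (by rw [hfd, hl])]
  · have hilt : (s.takeWhile (fun c => !PySem.Chars.isdigit c)).length < s.length := by
      have := congrArg List.length hdt
      rw [h] at this
      simp at this
      omega
    rw [if_neg (by rw [hfd]; omega)]
    have hrest : s.drop (bFirstDigit s 0) = r :: rs := by
      rw [hfd, ← hdt, h]
    have hrun : bEndRun s (bFirstDigit s 0) =
        bFirstDigit s 0 + ((r :: rs).takeWhile (fun c => PySem.Chars.isdigit c)).length := by
      rw [bEndRun_eq s (bFirstDigit s 0) (by rw [hfd]; omega), hrest]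
    have hslice : PySem.List.slice s (some ((bFirstDigit s 0 : Nat) : Int))
        (some ((bEndRun s (bFirstDigit s 0) : Nat) : Int)) =
        (r :: rs).takeWhile (fun c => PySem.Chars.isdigit c) := by
      rw [hrun]
      rw [show (((bFirstDigit s 0 + ((r :: rs).takeWhile (fun c => PySem.Chars.isdigit c)).length : Nat)) : Int)
            = ((bFirstDigit s 0 : Nat) : Int) + (((r :: rs).takeWhile (fun c => PySem.Chars.isdigit c)).length : Int) by push_cast; ring]
      rw [PySem.List.slice_natCast_add, hrest, take_length_takeWhile]
    rw [hslice]
    refine congrArg₂ Prod.mk rfl ?_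
    congr 1
    rw [hfd]
    ring

-- ===== VERDICT (by name: the statement is the Claim_ definition above) =====
theorem find_next_number_starting_at_idx_py_spec : Claim_equal_find_next_number_starting_at_idx_py := by
  intro line si _
  unfold Spec_find_next_number_starting_at_idx_py
  unfold find_next_number_starting_at_idx_py find_next_number_starting_at_idx_py_alt
  exact main_eq (PySem.List.slice line.toList (some si) none) si
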